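-- pv_equiv track=rewrite | github.com/pleasedodisturb/palimpsest | scripts/publishing/push_confluence_weekly.py | generate_weekly_summary
-- ===== SOURCE A (Python) =====
-- def generate_weekly_summary(week_info, context=None):
--     """Generate a weekly summary panel in Confluence format.
--
--     Args:
--         week_info: Dict from get_week_info().
--         context: Optional dict with additional context (achievements, blockers, next_week).
--
--     Returns:
--         str: Confluence storage format HTML.
--     """
--     context = context or {}
--     achievements = context.get("achievements", ["Weekly summary generated by automation"])
--     blockers = context.get("blockers", [])
--     next_week = context.get("next_week", [])
--
--     html = (
--         f'<ac:structured-macro ac:name="panel">'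
--         f'<ac:parameter ac:name="panelType">success</ac:parameter>'
--         f'<ac:rich-text-body>'
--         f'<h2>{week_info["label"]} - {week_info["date_range"]}</h2>'
--     )
--
--     # Achievements
--     html += "<h3>Achievements</h3><ul>"
--     for item in achievements:
--         html += f"<li>{item}</li>"
--     html += "</ul>"
--
--     # Blockers
--     if blockers:
--         html += "<h3>Blockers</h3><ul>"
--         for item in blockers:
--             html += f"<li>{item}</li>"
--         html += "</ul>"
--
--     # Next week
--     if next_week:
--         html += "<h3>Next Week</h3><ul>"
--         for item in next_week:
--             html += f"<li>{item}</li>"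
--         html += "</ul>"
--
--     html += "</ac:rich-text-body></ac:structured-macro>"
--     return html
-- ===== SOURCE B (Python) =====
-- def generate_weekly_summary(week_info, context=None):
--     """Generate a weekly summary panel in Confluence format (table-driven)."""
--     ctx = context or {}
--     sections = [
--         ("Achievements", ctx.get("achievements", ["Weekly summary generated by automation"]), True),
--         ("Blockers", ctx.get("blockers", []), False),
--         ("Next Week", ctx.get("next_week", []), False),
--     ]
--     parts = [
--         '<ac:structured-macro ac:name="panel">'
--         '<ac:parameter ac:name="panelType">success</ac:parameter>'
--         '<ac:rich-text-body>',
--         f'<h2>{week_info["label"]} - {week_info["date_range"]}</h2>',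
--     ]
--     for title, items, always in sections:
--         if always or items:
--             parts.append(f"<h3>{title}</h3><ul>")
--             parts.extend(f"<li>{item}</li>" for item in items)
--             parts.append("</ul>")
--     parts.append("</ac:rich-text-body></ac:structured-macro>")
--     return "".join(parts)
-- ===== Notes on version B (the rewrite author's own statement) =====
-- stated objective: simpler
-- what changed: Replaces three separate if/loop branches and repeated string += with a single uniform pass over a table of (title, items, always-shown) sections that collects parts into a list joined once at the end.
import Mathlib
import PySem

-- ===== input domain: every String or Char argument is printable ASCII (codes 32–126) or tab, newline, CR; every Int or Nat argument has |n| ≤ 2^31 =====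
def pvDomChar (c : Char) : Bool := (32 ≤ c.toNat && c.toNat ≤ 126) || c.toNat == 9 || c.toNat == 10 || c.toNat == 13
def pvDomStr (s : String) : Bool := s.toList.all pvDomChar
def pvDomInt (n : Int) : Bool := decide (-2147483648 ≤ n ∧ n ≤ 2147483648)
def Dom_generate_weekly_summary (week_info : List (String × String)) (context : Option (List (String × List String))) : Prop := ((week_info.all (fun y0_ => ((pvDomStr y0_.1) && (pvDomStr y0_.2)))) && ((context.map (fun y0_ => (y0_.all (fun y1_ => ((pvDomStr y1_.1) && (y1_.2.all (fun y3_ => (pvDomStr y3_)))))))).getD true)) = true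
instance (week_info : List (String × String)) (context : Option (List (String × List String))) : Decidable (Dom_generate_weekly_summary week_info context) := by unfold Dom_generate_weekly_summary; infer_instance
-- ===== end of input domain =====

-- B rewrites A's three if/loop branches as one uniform pass over a section table joined at the end (objective: simpler); return values proved equal on Pre_ (both keys present).

-- ===== PORT A =====
-- the 'for item in …: html += f"<li>{item}</li>"' loops of A
def pvLiLoopA (acc : String) (items : List String) : String :=
  items.foldl (fun h item => h ++ ("<li>" ++ item ++ "</li>")) acc

def generate_weekly_summary (week_info : List (String × String)) (context : Option (List (String × List String))) : String :=
  let ctx := PySem.Dict.mk (context.getD [])        -- context = context or {}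
  let achievements := ctx.getD "achievements" ["Weekly summary generated by automation"]
  let blockers := ctx.getD "blockers" []
  let next_week := ctx.getD "next_week" []
  let wid := PySem.Dict.mk week_info
  -- week_info["label"] / week_info["date_range"]: KeyError (= get? none) is excluded by Pre_; .getD "" is unreachable there
  let html := "<ac:structured-macro ac:name=\"panel\"><ac:parameter ac:name=\"panelType\">success</ac:parameter><ac:rich-text-body><h2>"
      ++ (wid.get? "label").getD "" ++ " - " ++ (wid.get? "date_range").getD "" ++ "</h2>"
  let html := pvLiLoopA (html ++ "<h3>Achievements</h3><ul>") achievements ++ "</ul>"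
  let html := if !blockers.isEmpty then pvLiLoopA (html ++ "<h3>Blockers</h3><ul>") blockers ++ "</ul>" else html
  let html := if !next_week.isEmpty then pvLiLoopA (html ++ "<h3>Next Week</h3><ul>") next_week ++ "</ul>" else html
  html ++ "</ac:rich-text-body></ac:structured-macro>"

-- ===== PORT B =====
def generate_weekly_summary_alt (week_info : List (String × String)) (context : Option (List (String × List String))) : String :=
  let ctx := PySem.Dict.mk (context.getD [])        -- ctx = context or {}
  let sections : List (String × List String × Bool) :=
    [("Achievements", ctx.getD "achievements" ["Weekly summary generated by automation"], true),
     ("Blockers", ctx.getD "blockers" [], false),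
     ("Next Week", ctx.getD "next_week" [], false)]
  let wid := PySem.Dict.mk week_info
  let parts : List String :=
    ["<ac:structured-macro ac:name=\"panel\"><ac:parameter ac:name=\"panelType\">success</ac:parameter><ac:rich-text-body>",
     "<h2>" ++ (wid.get? "label").getD "" ++ " - " ++ (wid.get? "date_range").getD "" ++ "</h2>"]
  -- the single 'for title, items, always in sections' pass
  let parts := sections.foldl
    (fun ps s =>
      if s.2.2 || !s.2.1.isEmpty then
        ps ++ ("<h3>" ++ s.1 ++ "</h3><ul>") :: (s.2.1.map (fun item => "<li>" ++ item ++ "</li>") ++ ["</ul>"])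
      else ps)
    parts
  PySem.Str.join "" (parts ++ ["</ac:rich-text-body></ac:structured-macro>"])

-- ===== PRECONDITION & SPEC =====
-- Pre_ excludes exactly the inputs where A raises KeyError: week_info missing "label" or "date_range".
def Pre_generate_weekly_summary (week_info : List (String × String)) (context : Option (List (String × List String))) : Prop :=
  ((PySem.Dict.mk week_info).get? "label").isSome ∧ ((PySem.Dict.mk week_info).get? "date_range").isSome
instance (week_info : List (String × String)) (context : Option (List (String × List String))) : Decidable (Pre_generate_weekly_summary week_info context) := by unfold Pre_generate_weekly_summary; infer_instance
def pvWitness_generate_weekly_summary : (List (String × String)) × (Option (List (String × List String))) :=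
  ([("label", "Week 1"), ("date_range", "Jan 1 - Jan 7")], some [("blockers", ["b1"])])

def Spec_generate_weekly_summary (week_info : List (String × String)) (context : Option (List (String × List String))) (out : String) : Prop := out = generate_weekly_summary_alt week_info context
instance (week_info : List (String × String)) (context : Option (List (String × List String))) (out : String) : Decidable (Spec_generate_weekly_summary week_info context out) := by unfold Spec_generate_weekly_summary; infer_instance

-- ===== CLAIM (what is proved, stated in full; the proofs are below) =====
def Claim_equal_generate_weekly_summary : Prop := ∀ (week_info : List (String × String)) (context : Option (List (String × List String))), Dom_generate_weekly_summary week_info context → Pre_generate_weekly_summary week_info context → Spec_generate_weekly_summary week_info context (generate_weekly_summary week_info context)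

-- ===== LEMMAS AND PROOFS =====
theorem pv_join0_cons (p : String) (ps : List String) : PySem.Str.join "" (p :: ps) = p ++ PySem.Str.join "" ps := by
  apply String.toList_inj.mp
  cases ps with
  | nil => simp [PySem.Str.toList_join, PySem.Chars.join, List.intercalate]
  | cons q qs => simp [PySem.Str.toList_join, PySem.Chars.join, List.intercalate]

theorem pv_join0_nil : PySem.Str.join "" ([] : List String) = "" := by
  apply String.toList_inj.mp
  simp [PySem.Str.toList_join, PySem.Chars.join, List.intercalate]

theorem pv_join0_append (xs ys : List String) :
    PySem.Str.join "" (xs ++ ys) = PySem.Str.join "" xs ++ PySem.Str.join "" ys := by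
  induction xs with
  | nil => simp [pv_join0_nil]
  | cons x xt ih => rw [List.cons_append, pv_join0_cons, pv_join0_cons, ih, String.append_assoc]

theorem pv_liLoop_eq (items : List String) (acc : String) :
    pvLiLoopA acc items = acc ++ PySem.Str.join "" (items.map fun it => "<li>" ++ it ++ "</li>") := by
  induction items generalizing acc with
  | nil => simp [pvLiLoopA, pv_join0_nil]
  | cons x xs ih =>
      rw [pvLiLoopA, List.foldl_cons, ← pvLiLoopA, ih]
      simp [pv_join0_cons, String.append_assoc]

-- ===== VERDICT (by name: the statement is the Claim_ definition above) =====
theorem generate_weekly_summary_spec : Claim_equal_generate_weekly_summary := by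
  intro week_info context _ _
  unfold Spec_generate_weekly_summary generate_weekly_summary generate_weekly_summary_alt
  simp only [List.foldl_cons, List.foldl_nil, Bool.true_or, Bool.false_or, if_true]
  by_cases hb : (PySem.Dict.mk (context.getD [])).getD "blockers" [] = [] <;>
  by_cases hn : (PySem.Dict.mk (context.getD [])).getD "next_week" [] = [] <;>
    simp [hb, hn, pv_liLoop_eq, pv_join0_cons, pv_join0_nil, pv_join0_append, String.append_assoc]
  all_goals (apply String.toList_inj.mp; simp)
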